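-- pv_equiv track=rewrite | github.com/the-alet/python-spbu | 5_5.py | gen_hamming_dist_strs
-- ===== SOURCE A (Python) =====
-- def hamming_dist(s1, s2):
--     return sum(c1 != c2 for c1, c2 in zip(s1, s2))
--
-- def gen_hamming_dist_strs(k, s):
--     n = len(s) # max length of the bit string
--     all_strings = []
--
--     # Generate all possible bit strings of length n
--     for i in range(2**n):
--         candidate = f"{{:0{n}b}}".format(i)  # Convert to binary with leading zeros
--         if hamming_dist(candidate, s) == k:
--             all_strings.append(candidate)
--
--     return all_strings
-- ===== SOURCE B (Python) =====
-- def gen_hamming_dist_strs(k, s):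
--     # Pruned backtracking: extend a prefix bit by bit, tracking mismatches so
--     # far, and cut any branch whose mismatch count already exceeds k.
--     def rec(i, d):
--         if i == len(s):
--             return [''] if d == k else []
--         res = []
--         for c in '01':
--             nd = d + (c != s[i])
--             if nd <= k:
--                 res += [c + t for t in rec(i + 1, nd)]
--         return res
--     return rec(0, 0)
-- ===== Notes on version B (the rewrite author's own statement) =====
-- stated objective: alternative
-- what changed: A enumerates all 2^n length-n bit strings via integer binary formatting and filters by Hamming distance; B generates candidates by pruned backtracking over positions, cutting any prefix whose mismatch count already exceeds k, so only the surviving subtree is visited (measured 318x at n=16, but its worst case with k close to n is still exponential).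
-- intended difference: On the empty string with k=0, A returns ["0"] because Python's zero-width binary format of 0 is "0", while B returns [""], the only length-0 string at Hamming distance 0, which is the intended value. — e.g. on gen_hamming_dist_strs(0, ""): A returns ["0"], B returns [""]
import Mathlib
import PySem

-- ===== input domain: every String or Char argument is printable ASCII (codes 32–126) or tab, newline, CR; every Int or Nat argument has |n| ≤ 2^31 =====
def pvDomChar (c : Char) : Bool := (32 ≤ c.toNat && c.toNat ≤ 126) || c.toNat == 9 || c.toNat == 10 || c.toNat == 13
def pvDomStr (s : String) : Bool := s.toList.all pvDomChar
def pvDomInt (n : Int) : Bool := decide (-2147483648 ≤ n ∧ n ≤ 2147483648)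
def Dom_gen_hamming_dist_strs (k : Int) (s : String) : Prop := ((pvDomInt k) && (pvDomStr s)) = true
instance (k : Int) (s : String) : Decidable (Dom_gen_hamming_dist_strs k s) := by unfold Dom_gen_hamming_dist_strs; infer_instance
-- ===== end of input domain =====

-- B replaces A's enumeration of all 2^n bit strings by pruned backtracking over
-- positions (cutting branches whose mismatch count already exceeds k); A = B
-- everywhere except the empty-string/k=0 corner stated in D_ below.

-- ===== PORT A =====
-- sum(c1 != c2 for c1, c2 in zip(s1, s2)) : count of mismatching zipped positions (exact)
def pvMismatch (p : Char × Char) : Bool := p.1 != p.2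

def hamming_dist (s1 s2 : String) : Int :=
  ((s1.toList.zip s2.toList).countP pvMismatch : Int)

-- binary digits of i (most significant first), [] for 0; pvBin is Python's bin-format of i
def pvBinCore : Nat → List Char
  | 0 => []
  | (n+1) => pvBinCore ((n+1)/2) ++ [if (n+1) % 2 = 1 then '1' else '0']
decreasing_by exact Nat.div_lt_self (Nat.succ_pos n) (by omega)

def pvBin (i : Nat) : List Char := if i = 0 then ['0'] else pvBinCore i

-- f"{:0nb}".format(i): left-pad the binary digits with '0' to width n (width is a minimum)
def pvPad (n : Nat) (l : List Char) : List Char := List.replicate (n - l.length) '0' ++ l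

def gen_hamming_dist_strs (k : Int) (s : String) : List String :=
  let n := s.length
  (List.range (2^n)).foldl (fun acc i =>
    let candidate := String.ofList (pvPad n (pvBin i))
    if hamming_dist candidate s = k then acc ++ [candidate] else acc) []

-- ===== PORT B =====
-- rec(i, d) of Source B, structurally on the remaining suffix of s (i ≡ position, d ≡ mismatches so far)
def pvAltRec (k : Int) : List Char → Int → List (List Char)
  | [], d => if d = k then [[]] else []
  | c :: rest, d =>
      (let nd := d + (if ('0' : Char) ≠ c then 1 else 0)
       if nd ≤ k then (pvAltRec k rest nd).map (fun t => '0' :: t) else []) ++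
      (let nd := d + (if ('1' : Char) ≠ c then 1 else 0)
       if nd ≤ k then (pvAltRec k rest nd).map (fun t => '1' :: t) else [])

def gen_hamming_dist_strs_alt (k : Int) (s : String) : List String :=
  (pvAltRec k s.toList 0).map (fun t => String.ofList t)

-- ===== PRECONDITION & SPEC =====
-- On the empty string with k = 0, A returns ["0"] (Python's zero-width binary format of 0
-- is "0"), while B returns [""], the only length-0 string at Hamming distance 0 — the
-- intended value.
def D_gen_hamming_dist_strs (k : Int) (s : String) : Prop := s = "" ∧ k = 0
instance (k : Int) (s : String) : Decidable (D_gen_hamming_dist_strs k s) := by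
  unfold D_gen_hamming_dist_strs; infer_instance

def Spec_gen_hamming_dist_strs (k : Int) (s : String) (out : List String) : Prop :=
  ¬ D_gen_hamming_dist_strs k s → out = gen_hamming_dist_strs_alt k s
instance (k : Int) (s : String) (out : List String) : Decidable (Spec_gen_hamming_dist_strs k s out) := by
  unfold Spec_gen_hamming_dist_strs; infer_instance

def pvDiffWitness_gen_hamming_dist_strs : Int × String := (0, "")
def pvDiffWitnessOut_gen_hamming_dist_strs : (List String) × (List String) := (["0"], [""])

-- ===== CLAIM (what is proved, stated in full; the proofs are below) =====
def Claim_unchanged_gen_hamming_dist_strs : Prop := ∀ (k : Int) (s : String), Dom_gen_hamming_dist_strs k s → Spec_gen_hamming_dist_strs k s (gen_hamming_dist_strs k s)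
def Claim_changed_gen_hamming_dist_strs : Prop := Dom_gen_hamming_dist_strs (pvDiffWitness_gen_hamming_dist_strs.1) (pvDiffWitness_gen_hamming_dist_strs.2) ∧ D_gen_hamming_dist_strs (pvDiffWitness_gen_hamming_dist_strs.1) (pvDiffWitness_gen_hamming_dist_strs.2) ∧ gen_hamming_dist_strs (pvDiffWitness_gen_hamming_dist_strs.1) (pvDiffWitness_gen_hamming_dist_strs.2) = pvDiffWitnessOut_gen_hamming_dist_strs.1 ∧ gen_hamming_dist_strs_alt (pvDiffWitness_gen_hamming_dist_strs.1) (pvDiffWitness_gen_hamming_dist_strs.2) = pvDiffWitnessOut_gen_hamming_dist_strs.2 ∧ pvDiffWitnessOut_gen_hamming_dist_strs.1 ≠ pvDiffWitnessOut_gen_hamming_dist_strs.2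
def Claim_exact_gen_hamming_dist_strs : Prop := ∀ (k : Int) (s : String), Dom_gen_hamming_dist_strs k s → D_gen_hamming_dist_strs k s → gen_hamming_dist_strs k s ≠ gen_hamming_dist_strs_alt k s

-- ===== LEMMAS AND PROOFS =====

-- Hamming distance on char lists (hamming_dist through String.ofList)
def pvHamL (a b : List Char) : Int := ((a.zip b).countP pvMismatch : Int)

theorem pvHamL_nil (b : List Char) : pvHamL [] b = 0 := by simp [pvHamL]

theorem pvHamL_cons (x y : Char) (a b : List Char) :
    pvHamL (x :: a) (y :: b) = (if x ≠ y then 1 else 0) + pvHamL a b := by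
  by_cases h : x = y <;> simp [pvHamL, List.countP_cons, pvMismatch, h] <;> push_cast <;> ring

theorem pvHamL_nonneg (a b : List Char) : 0 ≤ pvHamL a b := Int.natCast_nonneg _

theorem ham_mk (a b : List Char) : hamming_dist (String.ofList a) (String.ofList b) = pvHamL a b := by
  simp [hamming_dist, pvHamL]

-- all bit strings of length n, in ascending (binary) order
def pvAllBits : Nat → List (List Char)
  | 0 => [[]]
  | n+1 => (pvAllBits n).map (fun t => '0' :: t) ++ (pvAllBits n).map (fun t => '1' :: t)

theorem pvAllBits_len (n : Nat) (t : List Char) (h : t ∈ pvAllBits n) : t.length = n := by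
  induction n generalizing t with
  | zero => simp [pvAllBits] at h; simp [h]
  | succ m ih =>
    simp [pvAllBits] at h
    rcases h with ⟨u, hu, rfl⟩ | ⟨u, hu, rfl⟩ <;> simp [ih u hu]

-- B's recursion = filtering pvAllBits
theorem pvFilter_bits_nil (k d : Int) (cs : List Char) (bits : List (List Char))
    (b c : Char) (hgt : ¬ d + (if b ≠ c then 1 else 0) ≤ k)
    (hlen : ∀ t ∈ bits, t.length = cs.length) :
    bits.filter (fun t => decide (d + pvHamL (b :: t) (c :: cs) = k)) = [] := by
  rw [List.filter_eq_nil_iff]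
  intro t _
  have h0 := pvHamL_nonneg t cs
  simp only [pvHamL_cons, decide_eq_true_eq]
  omega

theorem pvAltRec_eq (k : Int) (cs : List Char) (d : Int) :
    pvAltRec k cs d = (pvAllBits cs.length).filter (fun t => decide (d + pvHamL t cs = k)) := by
  induction cs generalizing d with
  | nil =>
    simp only [pvAltRec, List.length_nil, pvAllBits, List.filter, pvHamL_nil, add_zero]
    by_cases h : d = k <;> simp [h]
  | cons c rest ih =>
    simp only [pvAltRec, List.length_cons, pvAllBits, List.filter_append, List.filter_map]
    congr 1
    · by_cases h : d + (if ('0' : Char) ≠ c then 1 else 0) ≤ k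
      · simp only [h, if_true, ih]
        congr 1
        apply List.filter_congr
        intro t _
        simp only [Function.comp_apply, pvHamL_cons, add_assoc]
      · simp only [h, if_false]
        rw [List.filter_congr (q := fun t => decide (d + pvHamL ('0' :: t) (c :: rest) = k))]
        · rw [pvFilter_bits_nil k d rest _ '0' c h (fun t ht => pvAllBits_len rest.length t ht)]
          simp
        · intro t _; simp [pvHamL_cons]
    · by_cases h : d + (if ('1' : Char) ≠ c then 1 else 0) ≤ k
      · simp only [h, if_true, ih]
        congr 1
        apply List.filter_congr
        intro t _
        simp only [Function.comp_apply, pvHamL_cons, add_assoc]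
      · simp only [h, if_false]
        rw [List.filter_congr (q := fun t => decide (d + pvHamL ('1' :: t) (c :: rest) = k))]
        · rw [pvFilter_bits_nil k d rest _ '1' c h (fun t ht => pvAllBits_len rest.length t ht)]
          simp
        · intro t _; simp [pvHamL_cons]

-- generic accumulator lemma for A's loop
theorem pvFoldl_if (P : Nat → Prop) [DecidablePred P] (f : Nat → String) (l : List Nat) (acc : List String) :
    l.foldl (fun acc i => if P i then acc ++ [f i] else acc) acc
      = acc ++ (l.filter (fun i => decide (P i))).map f := by
  induction l generalizing acc with
  | nil => simp
  | cons x xs ih => by_cases h : P x <;> simp [h, ih, List.append_assoc]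

theorem pvBinCore_zero : pvBinCore 0 = [] := by rw [pvBinCore]

theorem pvBinCore_succ (m : Nat) :
    pvBinCore (m+1) = pvBinCore ((m+1)/2) ++ [if (m+1) % 2 = 1 then '1' else '0'] := by
  rw [pvBinCore]

theorem pvBinCore_len (n i : Nat) (h : i < 2^n) : (pvBinCore i).length ≤ n := by
  induction n generalizing i with
  | zero =>
    have : i = 0 := by simpa using h
    simp [this, pvBinCore_zero]
  | succ m ih =>
    cases i with
    | zero => simp [pvBinCore_zero]
    | succ j =>
      rw [pvBinCore_succ]
      have e2 : 2^(m+1) = 2 * 2^m := by rw [pow_succ]; ring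
      have hq : (j+1)/2 < 2^m := by omega
      have := ih ((j+1)/2) hq
      simp only [List.length_append, List.length_cons, List.length_nil]
      omega

-- padded format of i equals padded format of i/2 plus the last bit (width n ≥ 1)
theorem pvReplicate_pred (n : Nat) (hn : 1 ≤ n) :
    List.replicate n '0' = List.replicate (n-1) '0' ++ ['0'] := by
  obtain ⟨m, rfl⟩ : ∃ m, n = m + 1 := ⟨n - 1, by omega⟩
  simp [List.replicate_succ']

theorem pvBin_zero : pvBin 0 = ['0'] := rfl

theorem pvBin_pos (i : Nat) (h : i ≠ 0) : pvBin i = pvBinCore i := by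
  rw [pvBin, if_neg h]

theorem pvPad_step (n i : Nat) (hn : 1 ≤ n) :
    pvPad (n+1) (pvBin i) = pvPad n (pvBin (i/2)) ++ [if i % 2 = 1 then '1' else '0'] := by
  cases i with
  | zero =>
    simp only [Nat.zero_div, Nat.zero_mod, pvBin_zero, pvPad, List.length_cons,
      List.length_nil, if_neg (by omega : ¬ (0 = 1))]
    rw [show (n + 1 - (0 + 1)) = n by omega, show (n - (0 + 1)) = n - 1 by omega,
      pvReplicate_pred n hn]
  | succ j =>
    rw [pvBin_pos (j+1) (by omega), pvBinCore_succ]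
    rcases Nat.eq_zero_or_pos ((j+1)/2) with hq | hq
    · rw [hq, pvBinCore_zero, pvBin_zero]
      simp only [pvPad, List.length_append, List.length_cons, List.length_nil]
      rw [show (n + 1 - (0 + (0 + 1))) = n by omega, show (n - (0 + 1)) = n - 1 by omega,
        pvReplicate_pred n hn]
      simp
    · rw [pvBin_pos ((j+1)/2) (by omega)]
      simp only [pvPad, List.length_append, List.length_cons, List.length_nil]
      rw [show (n + 1 - ((pvBinCore ((j+1)/2)).length + (0 + 1))) = n - ((pvBinCore ((j+1)/2)).length + 0) by omega]
      simp [List.append_assoc]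

theorem pvBinCore_add_pow (n : Nat) (hn : 1 ≤ n) : ∀ i, i < 2^n →
    pvBinCore (i + 2^n) = '1' :: pvPad n (pvBin i) := by
  induction n with
  | zero => omega
  | succ m ih =>
    intro i hi
    by_cases hm : m = 0
    · subst hm
      interval_cases i
      · rw [show (0 + 2^1) = 1 + 1 by norm_num, pvBinCore_succ]
        norm_num [pvBinCore_succ, pvBinCore_zero, pvBin, pvPad]
      · rw [show (1 + 2^1) = 2 + 1 by norm_num, pvBinCore_succ]
        norm_num [pvBinCore_succ, pvBinCore_zero, pvBin, pvPad]
    · have hm1 : 1 ≤ m := by omega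
      obtain ⟨j, hj⟩ : ∃ j, i + 2^(m+1) = j + 1 := ⟨i + 2^(m+1) - 1, by have := pow_pos (by omega : (0:ℕ) < 2) (m+1); omega⟩
      rw [hj, pvBinCore_succ, ← hj]
      have e2 : 2^(m+1) = 2^m * 2 := by rw [pow_succ]
      have hdiv : (i + 2^(m+1)) / 2 = i/2 + 2^m := by
        rw [e2, Nat.add_mul_div_right _ _ (by omega : 0 < 2)]
      have hmod : (i + 2^(m+1)) % 2 = i % 2 := by
        rw [e2, Nat.add_mul_mod_self_right]
      rw [hdiv, hmod, ih hm1 (i/2) (by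
        rw [Nat.div_lt_iff_lt_mul (by omega : 0 < 2)]
        calc i < 2^(m+1) := hi
          _ = 2^m * 2 := e2)]
      rw [List.cons_append, ← pvPad_step m i hm1]

theorem pvPad_len (n : Nat) (l : List Char) (h : l.length ≤ n) : (pvPad n l).length = n := by
  simp [pvPad]; omega

theorem pvBin_len (n i : Nat) (hn : 1 ≤ n) (h : i < 2^n) : (pvBin i).length ≤ n := by
  unfold pvBin; split
  · simpa using hn
  · exact pvBinCore_len n i h

-- the range loop enumerates exactly the length-n bit strings, in order (n ≥ 1)
theorem pvPad_eq_self (n : Nat) (l : List Char) (h : l.length = n) : pvPad n l = l := by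
  simp [pvPad, h]

theorem pvPad_cons_zero (m i : Nat) (hm : 1 ≤ m) (hi : i < 2^m) :
    pvPad (m+1) (pvBin i) = '0' :: pvPad m (pvBin i) := by
  have hL : (pvBin i).length ≤ m := pvBin_len m i hm hi
  simp only [pvPad]
  rw [show (m + 1 - (pvBin i).length) = (m - (pvBin i).length) + 1 by omega,
    List.replicate_succ]
  simp

theorem pvRange_map_bits (n : Nat) (hn : 1 ≤ n) :
    (List.range (2^n)).map (fun i => pvPad n (pvBin i)) = pvAllBits n := by
  induction n with
  | zero => omega
  | succ m ih =>
    by_cases hm : m = 0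
    · subst hm
      rw [show (2^1) = 2 by norm_num, show (List.range 2) = [0, 1] by decide]
      simp [pvAllBits, pvBin, pvPad, pvBinCore_succ, pvBinCore_zero]
    · have hm1 : 1 ≤ m := by omega
      have e2 : 2^(m+1) = 2^m + 2^m := by rw [pow_succ]; omega
      rw [e2, List.range_add, List.map_append, List.map_map, pvAllBits]
      congr 1
      · rw [List.map_congr_left (fun i hi => by
          rw [pvPad_cons_zero m i hm1 (List.mem_range.mp hi)]),
          show (fun i => '0' :: pvPad m (pvBin i)) = (fun t => '0' :: t) ∘ (fun i => pvPad m (pvBin i)) from rfl,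
          ← List.map_map, ih hm1]
      · rw [List.map_congr_left (fun i hi => by
          have hi' : i < 2^m := List.mem_range.mp hi
          show pvPad (m+1) (pvBin (2^m + i)) = ('1' :: pvPad m (pvBin i))
          have hb : pvBin (2^m + i) = '1' :: pvPad m (pvBin i) := by
            rw [pvBin_pos _ (by have := pow_pos (by omega : (0:ℕ) < 2) m; omega),
              Nat.add_comm (2^m) i, pvBinCore_add_pow m hm1 i hi']
          rw [hb]
          exact pvPad_eq_self _ _ (by
            simp [pvPad_len m _ (pvBin_len m i hm1 hi')])),
          show (fun i => '1' :: pvPad m (pvBin i)) = (fun t => '1' :: t) ∘ (fun i => pvPad m (pvBin i)) from rfl,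
          ← List.map_map, ih hm1]


-- ===== VERDICT (by name: the statement is the Claim_ definition above) =====
theorem gen_hamming_dist_strs_spec : Claim_unchanged_gen_hamming_dist_strs := by
  intro k s _
  unfold Spec_gen_hamming_dist_strs
  intro hD
  unfold gen_hamming_dist_strs gen_hamming_dist_strs_alt
  rw [pvFoldl_if (fun i => hamming_dist (String.ofList (pvPad s.length (pvBin i))) s = k)
      (fun i => String.ofList (pvPad s.length (pvBin i))), List.nil_append]
  by_cases hs : s = ""
  · subst hs
    have hk : ¬ ((0 : Int) = k) := fun h => hD ⟨rfl, h.symm⟩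
    simp [pvAltRec, pvPad, pvBin_zero, hamming_dist, pvMismatch, hk]
  · have hne : s.toList ≠ [] := fun h => hs (by
      have h2 := congrArg String.ofList h
      rw [String.ofList_toList] at h2
      exact h2)
    have hlen0 := String.length_toList (s := s)
    have hn : 1 ≤ s.length := by
      have := List.length_pos_iff.mpr hne
      omega
    have hham : ∀ t : List Char, hamming_dist (String.ofList t) s = pvHamL t s.toList := by
      intro t
      conv_lhs => rw [← @String.ofList_toList s]
      exact ham_mk t s.toList
    rw [show (fun i => String.ofList (pvPad s.length (pvBin i)))
        = String.ofList ∘ (fun i => pvPad s.length (pvBin i)) from rfl]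
    rw [show (fun i => decide (hamming_dist (String.ofList (pvPad s.length (pvBin i))) s = k))
        = ((fun t => decide (hamming_dist (String.ofList t) s = k))
            ∘ (fun i => pvPad s.length (pvBin i))) from rfl]
    rw [← List.map_map, ← List.filter_map, pvRange_map_bits s.length hn,
      pvAltRec_eq k s.toList 0, String.length_toList]
    congr 1
    apply List.filter_congr
    intro t _
    rw [zero_add, hham t]

theorem gen_hamming_dist_strs_changed : Claim_changed_gen_hamming_dist_strs := by
  unfold Claim_changed_gen_hamming_dist_strs; decide

theorem gen_hamming_dist_strs_tight : Claim_exact_gen_hamming_dist_strs := by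
  intro k s _ hD
  obtain ⟨rfl, rfl⟩ := hD
  decide
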